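-- pv_equiv track=rewrite | github.com/zeyushen-yo/resume-fting | eval/debug_agentic_run.py | pick_examples
-- ===== SOURCE A (Python) =====
-- from typing import Any, Dict, List, Tuple
--
-- def pick_examples(df_records: List[Dict[str, Any]]) -> Dict[str, Dict[str, Any]]:
--     """Pick one example for each of the requested pair types.
--
--     Targets: preferred, underqualified, reworded (or equal/equivalent).
--     """
--     targets: List[Tuple[str, List[str]]] = [
--         ("preferred", ["preferred"]),
--         ("underqualified", ["underqualified"]),
--         ("reworded", ["reworded", "equal", "equivalent"]),
--     ]
--     chosen: Dict[str, Dict[str, Any]] = {}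
--     for rec in df_records:
--         pt = str(rec.get("pair_type") or "").strip().lower()
--         for label, aliases in targets:
--             if label in chosen:
--                 continue
--             if pt in aliases:
--                 chosen[label] = rec
--         if len(chosen) == len(targets):
--             break
--     return chosen
-- ===== SOURCE B (Python) =====
-- from typing import Any, Dict, List, Tuple
--
-- def pick_examples(df_records: List[Dict[str, Any]]) -> Dict[str, Dict[str, Any]]:
--     """Pick one example for each of the requested pair types.
--
--     Loops transposed w.r.t. the original: for each target, scan for its first
--     matching record; then order the hits by record position so the dict has
--     the same insertion order.
--     """
--     targets: List[Tuple[str, List[str]]] = [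
--         ("preferred", ["preferred"]),
--         ("underqualified", ["underqualified"]),
--         ("reworded", ["reworded", "equal", "equivalent"]),
--     ]
--     hits: List[Tuple[int, str, Dict[str, Any]]] = []
--     for label, aliases in targets:
--         for i, rec in enumerate(df_records):
--             if str(rec.get("pair_type") or "").strip().lower() in aliases:
--                 hits.append((i, label, rec))
--                 break
--     hits.sort(key=lambda h: h[0])
--     return {label: rec for _, label, rec in hits}
-- ===== Notes on version B (the rewrite author's own statement) =====
-- stated objective: alternative
-- what changed: Loops transposed: instead of one interleaved pass over the records that fills a dict while skipping already-chosen labels, B scans the records once per target for that target's first matching record (alias sets are disjoint, so hits are identical), then orders the three hits by record position to reproduce the original dict insertion order.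
import Mathlib
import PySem

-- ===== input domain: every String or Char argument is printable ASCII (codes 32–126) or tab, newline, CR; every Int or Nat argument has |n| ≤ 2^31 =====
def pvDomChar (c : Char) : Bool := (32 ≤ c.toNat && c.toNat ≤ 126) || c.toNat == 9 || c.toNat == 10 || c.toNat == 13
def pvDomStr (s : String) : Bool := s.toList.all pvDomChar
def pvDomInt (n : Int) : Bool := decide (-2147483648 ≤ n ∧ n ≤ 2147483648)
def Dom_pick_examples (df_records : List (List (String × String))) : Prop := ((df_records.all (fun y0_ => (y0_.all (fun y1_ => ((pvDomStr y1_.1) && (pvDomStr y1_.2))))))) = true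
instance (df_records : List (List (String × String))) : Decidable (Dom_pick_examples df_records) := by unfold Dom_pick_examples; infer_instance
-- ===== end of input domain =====

-- B transposes the loops (one scan per target, first hit, then reorder by record
-- position) instead of A's single interleaved pass; objective: alternative decomposition.

-- shared helper: str(rec.get("pair_type") or "").strip().lower()
def pvNorm (rec : List (String × String)) : String :=
  PySem.Str.lower (PySem.Str.strip (((PySem.Dict.mk rec).get? "pair_type").getD ""))

-- targets: List[Tuple[str, List[str]]] (identical literal in A and B)
def pvTargets : List (String × List String) :=
  [("preferred", ["preferred"]),
   ("underqualified", ["underqualified"]),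
   ("reworded", ["reworded", "equal", "equivalent"])]

-- ===== PORT A =====
-- the 'for rec in df_records' loop with its 'break'; chosen is the accumulated dict
def pickLoopA : List (List (String × String)) → PySem.Dict String (List (String × String)) →
    PySem.Dict String (List (String × String))
  | [], chosen => chosen
  | rec :: rest, chosen =>
    let pt := pvNorm rec
    let chosen' := pvTargets.foldl (fun c t =>
      if c.contains t.1 then c
      else if t.2.contains pt then c.insert t.1 rec else c) chosen
    if chosen'.size = pvTargets.length then chosen' else pickLoopA rest chosen'

def pick_examples (df_records : List (List (String × String))) : List (String × List (String × String)) :=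
  (pickLoopA df_records PySem.Dict.empty).items

-- ===== PORT B =====
def pick_examples_alt (df_records : List (List (String × String))) : List (String × List (String × String)) :=
  -- for label, aliases in targets: first (i, rec) with normalized pair_type in aliases
  let hits := pvTargets.foldl (fun acc t =>
    match (PySem.List.enumerate df_records).find? (fun p => t.2.contains (pvNorm p.2)) with
    | some p => acc ++ [(p.1, t.1, p.2)]
    | none => acc) ([] : List (Int × String × List (String × String)))
  -- hits.sort(key=lambda h: h[0])
  let hits := PySem.List.sorted hits (fun h => h.1)
  -- {label: rec for _, label, rec in hits}
  (hits.foldl (fun d h => d.insert h.2.1 h.2.2) PySem.Dict.empty).items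

-- ===== PRECONDITION & SPEC =====
def Spec_pick_examples (df_records : List (List (String × String))) (out : List (String × List (String × String))) : Prop := out = pick_examples_alt df_records
instance (df_records : List (List (String × String))) (out : List (String × List (String × String))) : Decidable (Spec_pick_examples df_records out) := by unfold Spec_pick_examples; infer_instance

-- ===== CLAIM (what is proved, stated in full; the proofs are below) =====
def Claim_equal_pick_examples : Prop := ∀ (df_records : List (List (String × String))), Dom_pick_examples df_records → Spec_pick_examples df_records (pick_examples df_records)

-- ===== LEMMAS AND PROOFS =====

def pvChase : Int → List (List (String × String)) → List (String × List String) →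
    List (Int × String × List (String × String))
  | _, [], _ => []
  | i, rec :: rest, L =>
    match L.find? (fun t => t.2.contains (pvNorm rec)) with
    | some t => (i, t.1, rec) :: pvChase (i + 1) rest (L.erase t)
    | none => pvChase (i + 1) rest L

lemma pvChase_idx_lb : ∀ (i : Int) (df : List (List (String × String)))
    (L : List (String × List String)) (h : Int × String × List (String × String)),
    h ∈ pvChase i df L → i ≤ h.1 := by
  intro i df
  induction df generalizing i with
  | nil => intro L h hm; simp [pvChase] at hm
  | cons rec rest ih =>
    intro L h hm
    unfold pvChase at hm
    rcases hf : L.find? (fun t => t.2.contains (pvNorm rec)) with _ | t <;> rw [hf] at hm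
    · have := ih (i+1) L h hm; omega
    · rcases List.mem_cons.mp hm with h1 | h1
      · subst h1; simp
      · have := ih (i+1) _ h h1; omega

lemma pvChase_pairwise : ∀ (i : Int) (df : List (List (String × String)))
    (L : List (String × List String)),
    (pvChase i df L).Pairwise (fun a b => a.1 < b.1) := by
  intro i df
  induction df generalizing i with
  | nil => intro L; simp [pvChase]
  | cons rec rest ih =>
    intro L
    unfold pvChase
    rcases hf : L.find? (fun t => t.2.contains (pvNorm rec)) with _ | t <;> rw [hf]
    · exact ih (i+1) L
    · refine List.Pairwise.cons ?_ (ih (i+1) _)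
      intro b hb
      have := pvChase_idx_lb (i+1) rest _ b hb
      simpa using by omega

lemma pvChase_labels_sub : ∀ (i : Int) (df : List (List (String × String)))
    (L : List (String × List String)) (h : Int × String × List (String × String)),
    h ∈ pvChase i df L → h.2.1 ∈ L.map (·.1) := by
  intro i df
  induction df generalizing i with
  | nil => intro L h hm; simp [pvChase] at hm
  | cons rec rest ih =>
    intro L h hm
    unfold pvChase at hm
    rcases hf : L.find? (fun t => t.2.contains (pvNorm rec)) with _ | t <;> rw [hf] at hm
    · exact ih (i+1) L h hm
    · have htL : t ∈ L := List.mem_of_find?_eq_some hf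
      rcases List.mem_cons.mp hm with h1 | h1
      · subst h1; exact List.mem_map_of_mem htL
      · have := ih (i+1) _ h h1
        rcases List.mem_map.mp this with ⟨t', ht', he⟩
        exact he ▸ List.mem_map_of_mem (List.mem_of_mem_erase ht')

lemma pvChase_labels_nodup : ∀ (i : Int) (df : List (List (String × String)))
    (L : List (String × List String)), (L.map (·.1)).Nodup →
    ((pvChase i df L).map (fun h => h.2.1)).Nodup := by
  intro i df
  induction df generalizing i with
  | nil => intro L _; simp [pvChase]
  | cons rec rest ih =>
    intro L hnd
    unfold pvChase
    rcases hf : L.find? (fun t => t.2.contains (pvNorm rec)) with _ | t <;> rw [hf]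
    · exact ih (i+1) L hnd
    · have htL : t ∈ L := List.mem_of_find?_eq_some hf
      have hsub : (L.erase t).Sublist L := List.erase_sublist
      have hnd' : ((L.erase t).map (·.1)).Nodup := List.Nodup.sublist (List.Sublist.map _ hsub) hnd
      simp only [List.map_cons, List.nodup_cons]
      refine ⟨?_, ih (i+1) _ hnd'⟩
      intro hb
      rcases List.mem_map.mp hb with ⟨h', hh', he⟩
      have hl : t.1 ∈ (L.erase t).map (·.1) :=
        he ▸ pvChase_labels_sub (i+1) rest _ h' hh'
      -- t.1 not among labels of L.erase t
      rcases List.exists_erase_eq htL with ⟨L1, L2, hnotmem, heq, herase⟩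
      rw [herase] at hl
      rw [heq] at hnd
      simp only [List.map_append, List.map_cons, List.nodup_append, List.mem_append] at hnd hl
      rcases hl with hm1 | hm2
      · exact hnd.2.2 _ hm1 _ List.mem_cons_self rfl
      · exact ((List.nodup_cons.mp hnd.2.1).1 hm2)


lemma pvDisjoint (t t' : String × List String) (pt : String)
    (ht : t ∈ pvTargets) (ht' : t' ∈ pvTargets)
    (hm : pt ∈ t.2) (hm' : pt ∈ t'.2) : t = t' := by
  simp only [pvTargets, List.mem_cons, List.not_mem_nil, or_false] at ht ht'
  rcases ht with h | h | h <;> rcases ht' with h' | h' | h' <;> subst h <;> subst h' <;> simp_all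


def pvHitsOf (df : List (List (String × String))) (L : List (String × List String)) (i : Int) :
    List (Int × String × List (String × String)) :=
  L.filterMap (fun t => ((PySem.List.enumerate df i).find? (fun p => t.2.contains (pvNorm p.2))).map
    (fun p => (p.1, t.1, p.2)))

lemma pvChase_perm_hits : ∀ (df : List (List (String × String))) (i : Int)
    (L : List (String × List String)), L.Sublist pvTargets →
    (pvChase i df L).Perm (pvHitsOf df L i) := by
  intro df
  induction df with
  | nil =>
    intro i L _
    simp [pvChase, pvHitsOf, PySem.List.enumerate]
  | cons rec rest ih =>
    intro i L hsub
    have hLnd : L.Nodup := hsub.nodup (by decide)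
    unfold pvChase pvHitsOf
    rw [PySem.List.enumerate_cons]
    rcases hf : L.find? (fun t => t.2.contains (pvNorm rec)) with _ | t <;> rw [hf]
    · have hnm := List.find?_eq_none.mp hf
      have : (L.filterMap (fun t =>
          ((((i, rec) :: PySem.List.enumerate rest (i+1)).find? (fun p => t.2.contains (pvNorm p.2))).map
            (fun p => (p.1, t.1, p.2)))))
          = pvHitsOf rest L (i+1) := by
        apply List.filterMap_congr
        intro t htL
        rw [List.find?_cons_of_neg (by simpa using hnm t htL)]
      rw [this]
      exact ih (i+1) L hsub
    · obtain ⟨hp, as, bs, heq, hnas⟩ := List.find?_eq_some_iff_append.mp hf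
      have htL : t ∈ L := List.mem_of_find?_eq_some hf
      have htnas : t ∉ as := by
        intro hmem
        have h1 : pvNorm rec ∉ t.2 := by simpa using hnas t hmem
        exact h1 (by simpa using hp)
      have hnbs : ∀ t' ∈ bs, ¬ t'.2.contains (pvNorm rec) = true := by
        intro t' ht' hpt'
        have ht'L : t' ∈ L := heq ▸ (List.mem_append.mpr (Or.inr (List.mem_cons_of_mem _ ht')))
        have : t = t' := pvDisjoint t t' (pvNorm rec) (hsub.mem htL) (hsub.mem ht'L)
          (by simpa using hp) (by simpa using hpt')
        subst this
        rw [heq] at hLnd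
        exact (List.nodup_cons.mp (List.nodup_append.mp hLnd).2.1).1 ht'
      have hsub' : (as ++ bs).Sublist pvTargets := by
        refine List.Sublist.trans ?_ hsub
        rw [heq]
        exact List.Sublist.append (List.Sublist.refl as) (List.sublist_cons_self t bs)
      have ihp := ih (i+1) (as ++ bs) hsub'
      have hX : (as.filterMap (fun t' =>
          ((((i, rec) :: PySem.List.enumerate rest (i+1)).find? (fun p => t'.2.contains (pvNorm p.2))).map
            (fun p => (p.1, t'.1, p.2)))))
          = pvHitsOf rest as (i+1) := by
        apply List.filterMap_congr
        intro t' ht'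
        have h0 : pvNorm rec ∉ t'.2 := by simpa using hnas t' ht'
        rw [List.find?_cons_of_neg (by simpa using h0)]
      have hY : (bs.filterMap (fun t' =>
          ((((i, rec) :: PySem.List.enumerate rest (i+1)).find? (fun p => t'.2.contains (pvNorm p.2))).map
            (fun p => (p.1, t'.1, p.2)))))
          = pvHitsOf rest bs (i+1) := by
        apply List.filterMap_congr
        intro t' ht'
        have h0 : pvNorm rec ∉ t'.2 := by simpa using hnbs t' ht'
        rw [List.find?_cons_of_neg (by simpa using h0)]
      rw [heq, List.filterMap_append, List.filterMap_cons, hX, hY]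
      rw [List.find?_cons_of_pos (by simpa using hp)]
      simp only [Option.map_some]
      have hAB : pvHitsOf rest (as ++ bs) (i+1) = pvHitsOf rest as (i+1) ++ pvHitsOf rest bs (i+1) := by
        unfold pvHitsOf; rw [List.filterMap_append]
      rw [List.erase_append_right _ htnas, List.erase_cons_head]
      refine List.Perm.trans (List.Perm.cons _ (hAB ▸ ihp)) ?_
      exact List.perm_middle.symm

lemma pvChase_nil_targets : ∀ (i : Int) (df : List (List (String × String))), pvChase i df [] = [] := by
  intro i df
  induction df generalizing i with
  | nil => rfl
  | cons rec rest ih => simp [pvChase, ih]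

def pvActiveOf (bp bu br : Bool) : List (String × List String) :=
  (if bp then [] else [("preferred", ["preferred"])]) ++
  (if bu then [] else [("underqualified", ["underqualified"])]) ++
  (if br then [] else [("reworded", ["reworded", "equal", "equivalent"])])

lemma pvMem_activeOf (t : String × List String) (bp bu br : Bool) :
    t ∈ pvActiveOf bp bu br ↔
      ((t = ("preferred", ["preferred"]) ∧ bp = false) ∨
       (t = ("underqualified", ["underqualified"]) ∧ bu = false) ∨
       (t = ("reworded", ["reworded", "equal", "equivalent"]) ∧ br = false)) := by
  rcases bp <;> rcases bu <;> rcases br <;> simp [pvActiveOf]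

lemma pvStep_none (c : PySem.Dict String (List (String × String))) (rec : List (String × String))
    (h : ∀ t ∈ pvTargets, t.2.contains (pvNorm rec) = true → c.contains t.1 = true) :
    pvTargets.foldl (fun c t =>
      if c.contains t.1 then c
      else if t.2.contains (pvNorm rec) then c.insert t.1 rec else c) c = c := by
  have h1 := h ("preferred", ["preferred"]) (by simp [pvTargets])
  have h2 := h ("underqualified", ["underqualified"]) (by simp [pvTargets])
  have h3 := h ("reworded", ["reworded", "equal", "equivalent"]) (by simp [pvTargets])
  simp only [pvTargets, List.foldl_cons, List.foldl_nil]
  by_cases m1 : (["preferred"] : List String).contains (pvNorm rec) = true <;>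
  by_cases m2 : (["underqualified"] : List String).contains (pvNorm rec) = true <;>
  by_cases m3 : (["reworded", "equal", "equivalent"] : List String).contains (pvNorm rec) = true <;>
    simp_all

lemma pvStep_some (c : PySem.Dict String (List (String × String))) (rec : List (String × String))
    (t0 : String × List String) (ht0 : t0 ∈ pvTargets)
    (hm : t0.2.contains (pvNorm rec) = true) (hc : c.contains t0.1 = false) :
    pvTargets.foldl (fun c t =>
      if c.contains t.1 then c
      else if t.2.contains (pvNorm rec) then c.insert t.1 rec else c) c = c.insert t0.1 rec := by
  simp only [pvTargets, List.mem_cons, List.not_mem_nil, or_false] at ht0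
  simp only [pvTargets, List.foldl_cons, List.foldl_nil]
  rcases ht0 with h | h | h <;> subst h <;>
    simp only [List.contains_eq_mem, List.mem_cons, List.not_mem_nil, or_false, decide_eq_true_eq] at hm
  · -- t0 = preferred, pvNorm rec = "preferred"
    simp [hc, hm]
  · -- t0 = underqualified
    simp [hc, hm]
  · -- t0 = reworded: hm is a 3-way disjunction
    rcases hm with hm | hm | hm <;> simp [hc, hm]

lemma pickLoopA_chase : ∀ (df : List (List (String × String))) (i : Int)
    (c : PySem.Dict String (List (String × String))) (bp bu br : Bool),
    c.contains "preferred" = bp → c.contains "underqualified" = bu → c.contains "reworded" = br →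
    c.size = (cond bp 1 0) + (cond bu 1 0) + (cond br 1 0) →
    (pickLoopA df c).items = c.items ++ (pvChase i df (pvActiveOf bp bu br)).map (fun h => (h.2.1, h.2.2)) := by
  intro df
  induction df with
  | nil => intro i c bp bu br _ _ _ _; simp [pickLoopA, pvChase]
  | cons rec rest ih =>
    intro i c bp bu br hbp hbu hbr hsize
    simp only [pickLoopA, pvChase]
    rcases hf : (pvActiveOf bp bu br).find? (fun t => t.2.contains (pvNorm rec)) with _ | t <;> rw [hf]
    · -- no active target matches
      have hnm := List.find?_eq_none.mp hf
      have hstep : ∀ t ∈ pvTargets, t.2.contains (pvNorm rec) = true → c.contains t.1 = true := by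
        intro t htT hmt
        by_contra hcf
        have hcf' : c.contains t.1 = false := by simpa using hcf
        have htA : t ∈ pvActiveOf bp bu br := by
          rw [pvMem_activeOf]
          simp only [pvTargets, List.mem_cons, List.not_mem_nil, or_false] at htT
          rcases htT with h | h | h <;> subst h
          · exact Or.inl ⟨rfl, by rw [← hbp, hcf']⟩
          · exact Or.inr (Or.inl ⟨rfl, by rw [← hbu, hcf']⟩)
          · exact Or.inr (Or.inr ⟨rfl, by rw [← hbr, hcf']⟩)
        exact hnm t htA hmt
      rw [pvStep_none c rec hstep]
      by_cases hb : c.size = pvTargets.length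
      · -- all three already chosen: active list is empty
        have h3 : bp = true ∧ bu = true ∧ br = true := by
          rcases bp <;> rcases bu <;> rcases br <;> simp_all [pvTargets]
        rcases h3 with ⟨e1, e2, e3⟩; subst e1; subst e2; subst e3
        rw [if_pos hb]
        simp [pvChase_nil_targets, pvActiveOf]
      · rw [if_neg hb]
        exact ih (i+1) c bp bu br hbp hbu hbr hsize
    · -- the (unique) active target t matches rec
      have htA : t ∈ pvActiveOf bp bu br := List.mem_of_find?_eq_some hf
      have hmt : t.2.contains (pvNorm rec) = true := by
        have := List.find?_some (p := fun t : String × List String => t.2.contains (pvNorm rec)) hf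
        simpa using this
      rw [pvMem_activeOf] at htA
      rcases htA with ⟨he, hbool⟩ | ⟨he, hbool⟩ | ⟨he, hbool⟩ <;> subst he <;> subst hbool <;> dsimp only
      · -- preferred
        rw [pvStep_some c rec _ (by simp [pvTargets]) hmt hbp]
        have hsz : (c.insert "preferred" rec).size = c.size + 1 := by
          rw [PySem.Dict.size_insert, if_neg (by simp [hbp])]
        have hit : (c.insert "preferred" rec).items = c.items ++ [("preferred", rec)] :=
          PySem.Dict.items_insert_of_not_contains c rec hbp
        have her : (pvActiveOf false bu br).erase ("preferred", ["preferred"]) = pvActiveOf true bu br := by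
          simp [pvActiveOf]
        rw [her]
        by_cases hb : (c.insert "preferred" rec).size = pvTargets.length
        · have h3 : bu = true ∧ br = true := by
            rcases bu <;> rcases br <;> simp_all [pvTargets]
          rcases h3 with ⟨e2, e3⟩; subst e2; subst e3
          rw [if_pos hb, hit]
          simp [pvChase_nil_targets, pvActiveOf]
        · rw [if_neg hb]
          rw [ih (i+1) _ true bu br
            (by simp)
            (by simp [PySem.Dict.contains_insert, hbu])
            (by simp [PySem.Dict.contains_insert, hbr])
            (by rw [hsz, hsize]; rcases bu <;> rcases br <;> rfl), hit]
          simp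
      · -- underqualified
        rw [pvStep_some c rec _ (by simp [pvTargets]) hmt hbu]
        have hsz : (c.insert "underqualified" rec).size = c.size + 1 := by
          rw [PySem.Dict.size_insert, if_neg (by simp [hbu])]
        have hit : (c.insert "underqualified" rec).items = c.items ++ [("underqualified", rec)] :=
          PySem.Dict.items_insert_of_not_contains c rec hbu
        have her : (pvActiveOf bp false br).erase ("underqualified", ["underqualified"]) = pvActiveOf bp true br := by
          rcases bp <;> simp [pvActiveOf]
        rw [her]
        by_cases hb : (c.insert "underqualified" rec).size = pvTargets.length
        · have h3 : bp = true ∧ br = true := by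
            rcases bp <;> rcases br <;> simp_all [pvTargets]
          rcases h3 with ⟨e2, e3⟩; subst e2; subst e3
          rw [if_pos hb, hit]
          simp [pvChase_nil_targets, pvActiveOf]
        · rw [if_neg hb]
          rw [ih (i+1) _ bp true br
            (by simp [PySem.Dict.contains_insert, hbp])
            (by simp)
            (by simp [PySem.Dict.contains_insert, hbr])
            (by rw [hsz, hsize]; rcases bp <;> rcases br <;> rfl), hit]
          simp
      · -- reworded
        rw [pvStep_some c rec _ (by simp [pvTargets]) hmt hbr]
        have hsz : (c.insert "reworded" rec).size = c.size + 1 := by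
          rw [PySem.Dict.size_insert, if_neg (by simp [hbr])]
        have hit : (c.insert "reworded" rec).items = c.items ++ [("reworded", rec)] :=
          PySem.Dict.items_insert_of_not_contains c rec hbr
        have her : (pvActiveOf bp bu false).erase ("reworded", ["reworded", "equal", "equivalent"]) = pvActiveOf bp bu true := by
          rcases bp <;> rcases bu <;> simp [pvActiveOf]
        rw [her]
        by_cases hb : (c.insert "reworded" rec).size = pvTargets.length
        · have h3 : bp = true ∧ bu = true := by
            rcases bp <;> rcases bu <;> simp_all [pvTargets]
          rcases h3 with ⟨e2, e3⟩; subst e2; subst e3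
          rw [if_pos hb, hit]
          simp [pvChase_nil_targets, pvActiveOf]
        · rw [if_neg hb]
          rw [ih (i+1) _ bp bu true
            (by simp [PySem.Dict.contains_insert, hbp])
            (by simp [PySem.Dict.contains_insert, hbu])
            (by simp)
            (by rw [hsz, hsize]; rcases bp <;> rcases bu <;> rfl), hit]
          simp

-- relate B's hits-building foldl to a filterMap
lemma pvFoldlHits {α β γ : Type} (L : List α) (f : α → Option β) (g : α → β → γ) (acc : List γ) :
    L.foldl (fun a t => match f t with | some p => a ++ [g t p] | none => a) acc
      = acc ++ L.filterMap (fun t => (f t).map (g t)) := by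
  induction L generalizing acc with
  | nil => simp
  | cons t L ih =>
    cases h : f t <;> simp [List.foldl_cons, h, ih]

lemma pvHits_eq (df : List (List (String × String))) :
    pvTargets.foldl (fun acc t =>
      match (PySem.List.enumerate df).find? (fun p => t.2.contains (pvNorm p.2)) with
      | some p => acc ++ [(p.1, t.1, p.2)]
      | none => acc) ([] : List (Int × String × List (String × String)))
    = pvHitsOf df pvTargets 0 := by
  unfold pvHitsOf
  have h := pvFoldlHits pvTargets
    (fun t => (PySem.List.enumerate df).find? (fun p => t.2.contains (pvNorm p.2)))
    (fun (t : String × List String) (p : Int × List (String × String)) => (p.1, t.1, p.2)) []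
  rw [List.nil_append] at h
  convert h using 2
  funext a t
  cases (PySem.List.enumerate df).find? (fun p => t.2.contains (pvNorm p.2)) <;> rfl

-- ===== VERDICT (by name: the statement is the Claim_ definition above) =====
theorem pick_examples_spec : Claim_equal_pick_examples := by
  intro df _
  unfold Spec_pick_examples pick_examples
  have hB : pick_examples_alt df =
      ((PySem.List.sorted
        (pvTargets.foldl (fun acc t =>
          match (PySem.List.enumerate df).find? (fun p => t.2.contains (pvNorm p.2)) with
          | some p => acc ++ [(p.1, t.1, p.2)]
          | none => acc) ([] : List (Int × String × List (String × String))))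
        (fun h => h.1)).foldl (fun d h => d.insert h.2.1 h.2.2) PySem.Dict.empty).items := rfl
  rw [hB, pvHits_eq df]
  have hsorted : PySem.List.sorted (pvHitsOf df pvTargets 0) (fun h => h.1) = pvChase 0 df pvTargets :=
    PySem.List.sorted_eq_of_perm_of_pairwise_lt _ _ _
      (pvChase_perm_hits df 0 pvTargets (List.Sublist.refl _))
      (pvChase_pairwise 0 df pvTargets)
  rw [hsorted]
  have hlab : ((pvChase 0 df pvTargets).map (fun h => h.2.1)).Nodup :=
    pvChase_labels_nodup 0 df pvTargets (by decide)
  rw [PySem.Dict.items_foldl_insert_fresh (pvChase 0 df pvTargets) (fun h => h.2.1)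
      (fun h => h.2.2) PySem.Dict.empty (by intro a _; simp) hlab]
  have hA := pickLoopA_chase df 0 PySem.Dict.empty false false false
    (by simp) (by simp) (by simp) (by simp)
  rw [hA]
  rfl
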